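-- pv_equiv track=rewrite | github.com/JangoBoogaloo/LeetCodeExcercise | leetcodePython/BinarySearch/bs_1482.py | _canGetBouquets
-- ===== SOURCE A (Python) =====
-- from typing import List
--
-- def _canGetBouquets(bloomDay: List[int], bouquets: int, adjacentFlowers: int, days: int) -> bool:
--     actualBouquets = 0
--     adjacentCount = 0
--     for bloom in bloomDay:
--         if bloom > days:
--             adjacentCount = 0
--         else:
--             adjacentCount += 1
--         if adjacentCount == adjacentFlowers:
--             actualBouquets += 1
--             adjacentCount = 0
--         if actualBouquets >= bouquets:
--             return True
--     return False
-- ===== SOURCE B (Python) =====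
-- def _canGetBouquets(bloomDay, bouquets, adjacentFlowers, days):
--     # Pass 1: positions of flowers that have NOT bloomed by `days` (barriers).
--     barriers = [i for i, bloom in enumerate(bloomDay) if bloom > days]
--     # Pass 2: each maximal bloomed run lies between consecutive barriers
--     # (with sentinels -1 and len); its length is hi - lo - 1.
--     bounds = [-1] + barriers + [len(bloomDay)]
--     total = sum((hi - lo - 1) // adjacentFlowers for lo, hi in zip(bounds, bounds[1:]))
--     return total >= bouquets
-- ===== Notes on version B (the rewrite author's own statement) =====
-- stated objective: alternative
-- what changed: Replaces A's single-pass adjacency counter with early return by staged passes: first collect the indices of un-bloomed flowers (barriers), then compute the bouquet total arithmetically from the gaps between consecutive barriers and compare once.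
-- intended difference: On an empty bloomDay with bouquets <= 0, A returns False while B returns True; needing zero or fewer bouquets is trivially satisfied, so B's value is the intended one. — e.g. on _canGetBouquets([], 0, 1, 0): A returns false, B returns true
-- outside the precondition, e.g. on _canGetBouquets([5], 1, 0, 3): A returns True, B raises ZeroDivisionError; on _canGetBouquets([1], 0, -1, 1): A returns True, B returns False
import Mathlib
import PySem

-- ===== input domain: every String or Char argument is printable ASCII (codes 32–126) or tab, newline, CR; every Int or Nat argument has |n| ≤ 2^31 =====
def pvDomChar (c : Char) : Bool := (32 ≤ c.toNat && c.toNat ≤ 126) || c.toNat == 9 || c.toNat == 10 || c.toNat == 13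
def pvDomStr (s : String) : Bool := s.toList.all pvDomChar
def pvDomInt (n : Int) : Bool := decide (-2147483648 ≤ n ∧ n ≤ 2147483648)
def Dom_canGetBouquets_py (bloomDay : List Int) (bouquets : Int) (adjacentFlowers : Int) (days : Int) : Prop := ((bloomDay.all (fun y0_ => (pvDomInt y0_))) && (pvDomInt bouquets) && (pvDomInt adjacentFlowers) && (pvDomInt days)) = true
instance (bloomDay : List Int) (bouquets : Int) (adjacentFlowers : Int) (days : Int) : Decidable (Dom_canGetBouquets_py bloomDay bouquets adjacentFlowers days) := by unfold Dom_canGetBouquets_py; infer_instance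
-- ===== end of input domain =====

-- B replaces A's running adjacency counter (with early return) by staged passes:
-- collect the indices of un-bloomed flowers (barriers), then count bouquets
-- arithmetically from the gaps between consecutive barriers.


-- ===== PORT A =====
-- literal transliteration of A's loop: state (actualBouquets, adjacentCount), early return true
def canGetBouquets_py_go (bouquets adjacentFlowers days : Int) :
    List Int → Int → Int → Bool
  | [], _, _ => false
  | bloom :: rest, actualBouquets, adjacentCount =>
    let adjacentCount1 : Int := if bloom > days then 0 else adjacentCount + 1
    let s : Int × Int :=
      if adjacentCount1 = adjacentFlowers then (actualBouquets + 1, 0)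
      else (actualBouquets, adjacentCount1)
    if s.1 ≥ bouquets then true
    else canGetBouquets_py_go bouquets adjacentFlowers days rest s.1 s.2

def canGetBouquets_py (bloomDay : List Int) (bouquets : Int) (adjacentFlowers : Int) (days : Int) : Bool :=
  canGetBouquets_py_go bouquets adjacentFlowers days bloomDay 0 0

-- ===== PORT B =====
-- [i for i, bloom in enumerate(bloomDay) if bloom > days], as structural recursion on the list
def barsOf (days : Int) : List Int → Int → List Int
  | [], _ => []
  | bloom :: rest, i =>
    if bloom > days then i :: barsOf days rest (i + 1) else barsOf days rest (i + 1)

-- literal transliteration of Source B: barriers, sentinel bounds, gap sum over zip(bounds, bounds[1:])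
def canGetBouquets_py_alt (bloomDay : List Int) (bouquets : Int) (adjacentFlowers : Int) (days : Int) : Bool :=
  let barriers := barsOf days bloomDay 0
  let bounds : List Int := -1 :: (barriers ++ [(bloomDay.length : Int)])
  let total := (bounds.zip (bounds.drop 1)).foldl
      (fun t p => t + PySem.Int.floordiv (p.2 - p.1 - 1) adjacentFlowers) 0
  decide (total ≥ bouquets)

-- ===== PRECONDITION & SPEC =====
-- Pre_ restricts to the task's natural domain adjacentFlowers ≥ 1: for adjacentFlowers = 0
-- B's floor division raises ZeroDivisionError (A's values there are an accident of its
-- reset-then-compare order), and for negative adjacentFlowers neither behaviour is meaningful.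
def Pre_canGetBouquets_py (bloomDay : List Int) (bouquets : Int) (adjacentFlowers : Int) (days : Int) : Prop :=
  1 ≤ adjacentFlowers
instance (bloomDay : List Int) (bouquets : Int) (adjacentFlowers : Int) (days : Int) : Decidable (Pre_canGetBouquets_py bloomDay bouquets adjacentFlowers days) := by unfold Pre_canGetBouquets_py; infer_instance
def pvWitness_canGetBouquets_py : List Int × Int × Int × Int := ([1, 5, 2, 2], 2, 2, 3)

-- On an empty bloomDay with bouquets ≤ 0, A returns False while B returns True;
-- needing zero or fewer bouquets is trivially satisfied, so B's value is the intended one.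
def D_canGetBouquets_py (bloomDay : List Int) (bouquets : Int) (adjacentFlowers : Int) (days : Int) : Prop :=
  bloomDay = [] ∧ bouquets ≤ 0
instance (bloomDay : List Int) (bouquets : Int) (adjacentFlowers : Int) (days : Int) : Decidable (D_canGetBouquets_py bloomDay bouquets adjacentFlowers days) := by unfold D_canGetBouquets_py; infer_instance

def Spec_canGetBouquets_py (bloomDay : List Int) (bouquets : Int) (adjacentFlowers : Int) (days : Int) (out : Bool) : Prop := ¬ D_canGetBouquets_py bloomDay bouquets adjacentFlowers days → out = canGetBouquets_py_alt bloomDay bouquets adjacentFlowers days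
instance (bloomDay : List Int) (bouquets : Int) (adjacentFlowers : Int) (days : Int) (out : Bool) : Decidable (Spec_canGetBouquets_py bloomDay bouquets adjacentFlowers days out) := by unfold Spec_canGetBouquets_py; infer_instance

def pvDiffWitness_canGetBouquets_py : List Int × Int × Int × Int := ([], 0, 1, 0)
def pvDiffWitnessOut_canGetBouquets_py : Bool × Bool := (false, true)

-- ===== CLAIM (what is proved, stated in full; the proofs are below) =====
def Claim_unchanged_canGetBouquets_py : Prop := ∀ (bloomDay : List Int) (bouquets : Int) (adjacentFlowers : Int) (days : Int), Dom_canGetBouquets_py bloomDay bouquets adjacentFlowers days → Pre_canGetBouquets_py bloomDay bouquets adjacentFlowers days → Spec_canGetBouquets_py bloomDay bouquets adjacentFlowers days (canGetBouquets_py bloomDay bouquets adjacentFlowers days)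
def Claim_changed_canGetBouquets_py : Prop := Dom_canGetBouquets_py (pvDiffWitness_canGetBouquets_py.1) (pvDiffWitness_canGetBouquets_py.2.1) (pvDiffWitness_canGetBouquets_py.2.2.1) (pvDiffWitness_canGetBouquets_py.2.2.2) ∧ Pre_canGetBouquets_py (pvDiffWitness_canGetBouquets_py.1) (pvDiffWitness_canGetBouquets_py.2.1) (pvDiffWitness_canGetBouquets_py.2.2.1) (pvDiffWitness_canGetBouquets_py.2.2.2) ∧ D_canGetBouquets_py (pvDiffWitness_canGetBouquets_py.1) (pvDiffWitness_canGetBouquets_py.2.1) (pvDiffWitness_canGetBouquets_py.2.2.1) (pvDiffWitness_canGetBouquets_py.2.2.2) ∧ canGetBouquets_py (pvDiffWitness_canGetBouquets_py.1) (pvDiffWitness_canGetBouquets_py.2.1) (pvDiffWitness_canGetBouquets_py.2.2.1) (pvDiffWitness_canGetBouquets_py.2.2.2) = pvDiffWitnessOut_canGetBouquets_py.1 ∧ canGetBouquets_py_alt (pvDiffWitness_canGetBouquets_py.1) (pvDiffWitness_canGetBouquets_py.2.1) (pvDiffWitness_canGetBouquets_py.2.2.1) (pvDiffWitness_canGetBouquets_py.2.2.2)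 = pvDiffWitnessOut_canGetBouquets_py.2 ∧ pvDiffWitnessOut_canGetBouquets_py.1 ≠ pvDiffWitnessOut_canGetBouquets_py.2
def Claim_exact_canGetBouquets_py : Prop := ∀ (bloomDay : List Int) (bouquets : Int) (adjacentFlowers : Int) (days : Int), Dom_canGetBouquets_py bloomDay bouquets adjacentFlowers days → Pre_canGetBouquets_py bloomDay bouquets adjacentFlowers days → D_canGetBouquets_py bloomDay bouquets adjacentFlowers days → canGetBouquets_py bloomDay bouquets adjacentFlowers days ≠ canGetBouquets_py_alt bloomDay bouquets adjacentFlowers days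

-- ===== LEMMAS AND PROOFS =====

-- number of bouquets A's loop produces from l starting with adjacentCount = adj
def gA (adjacentFlowers days : Int) : List Int → Int → Int
  | [], _ => 0
  | bloom :: rest, adj =>
    let adj1 : Int := if bloom > days then 0 else adj + 1
    if adj1 = adjacentFlowers then 1 + gA adjacentFlowers days rest 0
    else gA adjacentFlowers days rest adj1

-- the bouquets still to come, run-length view: current run has length r
def hB (adjacentFlowers days : Int) : List Int → Int → Int
  | [], r => PySem.Int.floordiv r adjacentFlowers
  | bloom :: rest, r =>
    if bloom ≤ days then hB adjacentFlowers days rest (r + 1)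
    else PySem.Int.floordiv r adjacentFlowers + hB adjacentFlowers days rest 0

theorem gA_nonneg (af days : Int) (l : List Int) (adj : Int) : 0 ≤ gA af days l adj := by
  induction l generalizing adj with
  | nil => simp [gA]
  | cons b rest ih =>
      have h0 := ih (0 : Int)
      have h1 := ih (adj + 1)
      simp only [gA]
      split_ifs <;> omega

-- A's early-return loop, characterised: on a nonempty list it is exactly the final comparison
theorem goA_char (bq af days : Int) (l : List Int) (hl : l ≠ []) : ∀ (actual adj : Int),
    canGetBouquets_py_go bq af days l actual adj = decide (bq ≤ actual + gA af days l adj) := by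
  induction l with
  | nil => exact absurd rfl hl
  | cons b rest ih =>
      intro actual adj
      simp only [canGetBouquets_py_go, gA]
      by_cases hc : (if b > days then (0 : Int) else adj + 1) = af
      · simp only [if_pos hc]
        rcases rest with _ | ⟨r2, rest2⟩
        · simp only [canGetBouquets_py_go, gA]
          by_cases h1 : bq ≤ actual + 1 <;> simp [ge_iff_le, h1] <;> omega
        · rw [ih (by simp)]
          have hg := gA_nonneg af days (r2 :: rest2) 0
          by_cases h1 : bq ≤ actual + 1 <;> simp [ge_iff_le, h1] <;> omega
      · simp only [if_neg hc]
        rcases rest with _ | ⟨r2, rest2⟩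
        · simp only [canGetBouquets_py_go, gA]
          by_cases h1 : bq ≤ actual <;> simp [ge_iff_le, h1] <;> omega
        · rw [ih (by simp)]
          have hg := gA_nonneg af days (r2 :: rest2) (if days < b then (0 : Int) else adj + 1)
          by_cases h1 : bq ≤ actual <;> simp [ge_iff_le, h1] <;> omega

-- floor-division step facts, for 0 ≤ r, 0 < af
theorem fd_step (r af : Int) (hr : 0 ≤ r) (haf : 0 < af) :
    (r % af + 1 = af → (r + 1) % af = 0 ∧ (r + 1) / af = r / af + 1) ∧
    (r % af + 1 ≠ af → (r + 1) % af = r % af + 1 ∧ (r + 1) / af = r / af) := by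
  have h0 : 0 ≤ r % af := Int.emod_nonneg r (by omega)
  have h1 : r % af < af := Int.emod_lt_of_pos r haf
  have h2 : af * (r / af) + r % af = r := Int.ediv_add_emod r af
  constructor
  · intro heq
    have hmul : af * (r / af + 1) = af * (r / af) + af := by ring
    have hre : r + 1 = af * (r / af + 1) := by omega
    constructor
    · rw [hre]; exact Int.mul_emod_right af _
    · rw [hre, Int.mul_ediv_cancel_left _ (by omega : af ≠ 0)]
  · intro hne
    have hlt : r % af + 1 < af := by omega
    have heqr : r + 1 = (r % af + 1) + af * (r / af) := by omega
    constructor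
    · rw [heqr, Int.add_mul_emod_self_left, Int.emod_eq_of_lt (by omega) hlt]
    · rw [heqr, Int.add_mul_ediv_left _ _ (by omega : af ≠ 0),
          Int.ediv_eq_zero_of_lt (by omega) hlt, zero_add]

-- the run-length total = bouquets pending in the current run + A's future bouquets
theorem hB_eq_gA (af days : Int) (haf : 1 ≤ af) (l : List Int) (r : Int) (hr : 0 ≤ r) :
    hB af days l r = r / af + gA af days l (r % af) := by
  induction l generalizing r with
  | nil =>
      simp [hB, gA, PySem.Int.floordiv_eq_ediv_of_pos (by omega : (0 : Int) < af)]
  | cons b rest ih =>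
      have haf0 : (0 : Int) < af := by omega
      simp only [hB, gA]
      by_cases hb : b ≤ days
      · have hgt : ¬ (b > days) := by omega
        rw [if_pos hb, ih (r + 1) (by omega)]
        simp only [if_neg hgt]
        obtain ⟨hy, hn⟩ := fd_step r af hr haf0
        rcases Decidable.em (r % af + 1 = af) with hc | hc
        · rw [(hy hc).1, (hy hc).2, if_pos hc]; ring
        · rw [(hn hc).1, (hn hc).2, if_neg hc]
      · have hgt : b > days := by omega
        rw [if_neg hb, ih 0 le_rfl]
        simp only [if_pos hgt, Int.zero_emod, Int.zero_ediv, zero_add,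
          PySem.Int.floordiv_eq_ediv_of_pos haf0]
        rw [if_neg (by omega : ¬ (0 : Int) = af)]

-- recursive form of B's gap sum over lo :: bars ++ [e]
def gapSum (af : Int) : Int → List Int → Int → Int
  | lo, [], e => PySem.Int.floordiv (e - lo - 1) af
  | lo, x :: xs, e => PySem.Int.floordiv (x - lo - 1) af + gapSum af x xs e

-- B's zip-fold over consecutive pairs equals gapSum
theorem zip_fold_gapSum (af : Int) (bars : List Int) : ∀ (lo e t : Int),
    ((lo :: (bars ++ [e])).zip (bars ++ [e])).foldl
        (fun t p => t + PySem.Int.floordiv (p.2 - p.1 - 1) af) t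
      = t + gapSum af lo bars e := by
  induction bars with
  | nil => intro lo e t; simp [gapSum]
  | cons x xs ih =>
      intro lo e t
      simp only [List.cons_append, List.zip_cons_cons, List.foldl_cons, gapSum]
      rw [ih x e _]
      ring_nf

-- the gap sum over the barrier list equals the run-length total
theorem gapSum_bars_eq_hB (af days : Int) (l : List Int) : ∀ (i lo : Int),
    gapSum af lo (barsOf days l i) ((i + l.length : Int)) = hB af days l (i - lo - 1) := by
  induction l with
  | nil => intro i lo; simp [barsOf, gapSum, hB]
  | cons b rest ih =>
      intro i lo
      simp only [barsOf, hB, List.length_cons]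
      by_cases hb : b > days
      · have hb' : ¬ (b ≤ days) := by omega
        rw [if_pos hb, if_neg hb']
        simp only [gapSum]
        have he : (i + (rest.length + 1 : Nat) : Int) = (i + 1) + rest.length := by
          push_cast; ring
        rw [he, ih (i + 1) i]
        norm_num
      · have hb' : b ≤ days := by omega
        rw [if_neg hb, if_pos hb']
        have he : (i + (rest.length + 1 : Nat) : Int) = (i + 1) + rest.length := by
          push_cast; ring
        rw [he, ih (i + 1) lo]
        congr 1; ring

theorem alt_char (bloomDay : List Int) (bq af days : Int) (haf : 1 ≤ af) :
    canGetBouquets_py_alt bloomDay bq af days = decide (bq ≤ gA af days bloomDay 0) := by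
  unfold canGetBouquets_py_alt
  simp only [ge_iff_le, List.drop_succ_cons, List.drop_zero]
  rw [zip_fold_gapSum af (barsOf days bloomDay 0) (-1) (bloomDay.length : Int) 0]
  have h := gapSum_bars_eq_hB af days bloomDay 0 (-1)
  have h0 : (0 : Int) - -1 - 1 = 0 := by norm_num
  simp only [zero_add, h0] at h
  rw [h, hB_eq_gA af days haf bloomDay 0 le_rfl]
  simp

-- ===== VERDICT (by name: the statement is the Claim_ definition above) =====
theorem canGetBouquets_py_spec : Claim_unchanged_canGetBouquets_py := by
  intro bloomDay bq af days _ hpre hnd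
  have haf : 1 ≤ af := hpre
  rw [alt_char bloomDay bq af days haf]
  rcases bloomDay with _ | ⟨b, rest⟩
  · have hbq : 0 < bq := by
      by_contra h
      exact hnd ⟨rfl, by omega⟩
    simp [canGetBouquets_py, canGetBouquets_py_go, gA]
    omega
  · unfold canGetBouquets_py
    rw [goA_char bq af days (b :: rest) (by simp) 0 0]
    simp

theorem canGetBouquets_py_changed : Claim_changed_canGetBouquets_py := by
  unfold Claim_changed_canGetBouquets_py; decide

theorem canGetBouquets_py_tight : Claim_exact_canGetBouquets_py := by
  intro bloomDay bq af days _ hpre hd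
  obtain ⟨hnil, hbq⟩ := hd
  subst hnil
  have haf : 1 ≤ af := hpre
  rw [alt_char [] bq af days haf]
  simp [canGetBouquets_py, canGetBouquets_py_go, gA, hbq]
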